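-- pv_equiv track=rewrite | github.com/bob8dod/Preparing_CodingTest | Programmers/Greedy/P11497.py | check
-- ===== SOURCE A (Python) =====
-- from collections import deque
--
-- def check(N,li):
--     result=deque()
--     li.sort(reverse=True)
--     result.append(li[0])
--     for i in range(1,N,2):
--         result.append(li[i])
--         if i+1 < len(li): result.appendleft(li[i+1])
--
--     answer = 0
--     for i in range(1, N):
--         answer = max(answer, abs(result[i-1] - result[i]))
--
--     return answer
-- ===== SOURCE B (Python) =====
-- def check(N, li):
--     li.sort(reverse=True)
--     if N < 2:
--         return 0
--     arr = li[2:N + 1:2][::-1] + li[:1] + li[1:N:2]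
--     arr = arr[:N]
--     best = 0
--     for x, y in zip(arr, arr[1:]):
--         best = max(best, abs(x - y))
--     return best
-- ===== Notes on version B (the rewrite author's own statement) =====
-- stated objective: simpler
-- what changed: B drops the deque-building loop and the second index loop: it expresses the two-ended arrangement directly as three slices of the descending-sorted list (even positions reversed, the head, odd positions), truncates to N, and takes the max adjacent difference in one zip pass.
import Mathlib
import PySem

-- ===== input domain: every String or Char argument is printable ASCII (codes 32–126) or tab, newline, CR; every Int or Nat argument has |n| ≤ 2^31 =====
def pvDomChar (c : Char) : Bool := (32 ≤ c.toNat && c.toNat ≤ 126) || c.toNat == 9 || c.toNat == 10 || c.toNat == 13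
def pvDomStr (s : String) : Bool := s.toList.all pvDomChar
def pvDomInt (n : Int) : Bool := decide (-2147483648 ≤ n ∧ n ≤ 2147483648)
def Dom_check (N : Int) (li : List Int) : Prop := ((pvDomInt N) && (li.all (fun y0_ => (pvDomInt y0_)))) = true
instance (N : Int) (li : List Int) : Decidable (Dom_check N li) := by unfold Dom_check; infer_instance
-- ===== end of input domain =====

-- B replaces A's deque-building loop and index loop by slice expressions and one zip pass (simpler);
-- both A and B sort li in place in Python — the equivalence proved here is about the return value.

-- ===== PORT A =====
def check (N : Int) (li : List Int) : Int :=
  let s := PySem.List.sorted li (fun x => x) true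
  let result := (PySem.List.pyRange 1 N 2).foldl (fun r i =>
      let r := r ++ [PySem.List.pyGetD s i 0]
      if i + 1 < (s.length : Int) then (PySem.List.pyGetD s (i + 1) 0) :: r else r)
    [PySem.List.pyGetD s 0 0]
  (PySem.List.pyRange 1 N 1).foldl (fun answer i =>
      max answer |PySem.List.pyGetD result (i - 1) 0 - PySem.List.pyGetD result i 0|) 0

-- ===== PORT B =====
def check_alt (N : Int) (li : List Int) : Int :=
  let s := PySem.List.sorted li (fun x => x) true
  if N < 2 then 0
  else
    let arr0 := ((PySem.List.slice? s (some 2) (some (N + 1)) 2).getD []).reverse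
        ++ PySem.List.slice s none (some 1)
        ++ (PySem.List.slice? s (some 1) (some N) 2).getD []
    let arr := PySem.List.slice arr0 none (some N)
    (arr.zip arr.tail).foldl (fun best p => max best |p.1 - p.2|) 0

-- ===== PRECONDITION & SPEC =====
-- Pre_ is exactly the set of inputs on which the Python A returns normally: on li = [] A raises
-- IndexError at li[0], and for N > len(li) it raises IndexError indexing li or the deque.
def Pre_check (N : Int) (li : List Int) : Prop := li ≠ [] ∧ N ≤ (li.length : Int)
instance (N : Int) (li : List Int) : Decidable (Pre_check N li) := by unfold Pre_check; infer_instance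
def pvWitness_check : Int × List Int := (3, [5, 1, 4])

def Spec_check (N : Int) (li : List Int) (out : Int) : Prop := out = check_alt N li
instance (N : Int) (li : List Int) (out : Int) : Decidable (Spec_check N li out) := by unfold Spec_check; infer_instance

-- ===== CLAIM (what is proved, stated in full; the proofs are below) =====
def Claim_equal_check : Prop := ∀ (N : Int) (li : List Int), Dom_check N li → Pre_check N li → Spec_check N li (check N li)

-- ===== LEMMAS AND PROOFS =====

-- A's deque-building loop over the odd indices, characterised: prepends collect the even
-- positions ≥ 2 (while in range), appends collect the odd positions.
theorem pv_build (s : List Int) : ∀ (k : Nat) (acc : List Int),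
    (∀ j < k, 1 + 2 * j < s.length) →
    ((List.range k).map (fun j : Nat => (1 : Int) + 2 * j)).foldl
      (fun r i => if i + 1 < (s.length : Int)
        then PySem.List.pyGetD s (i + 1) 0 :: (r ++ [PySem.List.pyGetD s i 0])
        else r ++ [PySem.List.pyGetD s i 0]) acc
    = (((List.range k).filter (fun j => decide (2 + 2 * j < s.length))).map
        (fun j => s.getD (2 + 2 * j) 0)).reverse
      ++ acc ++ (List.range k).map (fun j => s.getD (1 + 2 * j) 0) := by
  intro k
  induction k with
  | zero => intro acc _; simp
  | succ k ih =>
    intro acc h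
    have hk : 1 + 2 * k < s.length := h k (Nat.lt_succ_self k)
    have h' : ∀ j < k, 1 + 2 * j < s.length := fun j hj => h j (Nat.lt_succ_of_lt hj)
    rw [List.range_succ, List.map_append, List.foldl_append, ih acc h']
    have e1 : ((1 : Int) + 2 * (k : Int)) = ((1 + 2 * k : Nat) : Int) := by push_cast; ring
    have e2 : ((1 : Int) + 2 * (k : Int)) + 1 = ((2 + 2 * k : Nat) : Int) := by push_cast; ring
    simp only [List.foldl_cons, List.foldl_nil, List.map_cons, List.map_nil]
    rw [List.filter_append, List.map_append]
    by_cases hc : 2 + 2 * k < s.length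
    · rw [if_pos (by rw [e2]; exact_mod_cast hc)]
      rw [e2, e1, PySem.List.pyGetD_natCast, PySem.List.pyGetD_natCast]
      simp [hc, List.append_assoc]
    · rw [if_neg (by rw [e2]; exact_mod_cast hc)]
      rw [e1, PySem.List.pyGetD_natCast]
      simp [hc, List.append_assoc]

-- the truncating filter on an initial range is itself a range
theorem pv_filter_range (n : Nat) : ∀ (k : Nat),
    (List.range k).filter (fun j => decide (2 + 2 * j < n)) = List.range (min k ((n - 1) / 2)) := by
  intro k
  induction k with
  | zero => simp
  | succ k ih =>
    rw [List.range_succ, List.filter_append, ih]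
    by_cases hc : 2 + 2 * k < n
    · have h1 : k < (n - 1) / 2 := by omega
      have h2 : min (k + 1) ((n - 1) / 2) = min k ((n - 1) / 2) + 1 := by omega
      simp [hc, h2, List.range_succ, Nat.min_def]
      omega
    · have h2 : min (k + 1) ((n - 1) / 2) = min k ((n - 1) / 2) := by omega
      simp [hc, h2]

-- zip with the tail enumerates adjacent pairs by index
theorem pv_zip_tail (xs : List Int) :
    xs.zip xs.tail
      = (List.range (xs.length - 1)).map (fun j => (xs.getD j 0, xs.getD (j + 1) 0)) := by
  induction xs with
  | nil => simp
  | cons a t ih =>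
    cases t with
    | nil => simp
    | cons b u =>
      have : (a :: b :: u).length - 1 = (b :: u).length - 1 + 1 := by simp
      rw [this, List.range_succ_eq_map]
      simp only [List.tail_cons, List.zip_cons_cons, List.map_cons, List.map_map]
      refine List.cons_eq_cons.mpr ⟨by simp, ?_⟩
      have hz : (b :: u).zip u = (b :: u).zip (b :: u).tail := by simp
      rw [hz, ih]
      apply List.map_congr_left
      intro j hj
      simp [Function.comp]

-- a filterMap over a range whose entries are all `some` is a map
theorem pv_filterMap_range (m : Nat) (f : Nat → Option Int) (g : Nat → Int)
    (h : ∀ k < m, f k = some (g k)) :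
    (List.range m).filterMap f = (List.range m).map g := by
  induction m with
  | zero => simp
  | succ m ih =>
    rw [List.range_succ, List.filterMap_append, List.map_append,
      ih (fun k hk => h k (Nat.lt_succ_of_lt hk))]
    simp [h m (Nat.lt_succ_self m)]

theorem pv_getD_take (r : List Int) (m j : Nat) (hj : j < m) :
    (r.take m).getD j 0 = r.getD j 0 := by
  simp [List.getD_eq_getElem?_getD, hj]

-- A's second loop (index loop over the deque) equals the zip pass over the first N entries
theorem pv_answer (r : List Int) (N : Int) (h2 : 2 ≤ N) (hlen : N ≤ (r.length : Int)) :
    (PySem.List.pyRange 1 N 1).foldl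
      (fun a i => max a |PySem.List.pyGetD r (i - 1) 0 - PySem.List.pyGetD r i 0|) 0
    = (((r.take N.toNat).zip (r.take N.toNat).tail)).foldl
        (fun b p => max b |p.1 - p.2|) 0 := by
  set m : Nat := N.toNat with hm
  have hmr : m ≤ r.length := by omega
  have hlt : (r.take m).length = m := by simp [hmr]
  rw [PySem.List.pyRange_of_pos 1 N (by norm_num)]
  rw [if_pos (by omega)]
  have hc : ((N - 1 + 1 - 1) / 1).toNat = m - 1 := by omega
  rw [hc, List.foldl_map]
  rw [pv_zip_tail, hlt, List.foldl_map]
  apply PySem.List.foldl_congr_mem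
  intro a x hx
  have hxlt : x < m - 1 := List.mem_range.mp hx
  have e1 : (1 : Int) + 1 * (x : Int) - 1 = ((x : Nat) : Int) := by ring
  have e2 : (1 : Int) + 1 * (x : Int) = ((x + 1 : Nat) : Int) := by push_cast; ring
  rw [e1, e2, PySem.List.pyGetD_natCast, PySem.List.pyGetD_natCast,
    pv_getD_take r m x (by omega), pv_getD_take r m (x + 1) (by omega)]

-- evaluating B's step-2 slices of the sorted list
theorem pv_slice_up (s : List Int) (N : Int) (h2 : 2 ≤ N) (hn : N ≤ (s.length : Int)) (hn2 : 2 ≤ s.length) :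
    (PySem.List.slice? s (some 2) (some (N + 1)) 2).getD []
    = (List.range (min (N / 2).toNat ((s.length - 1) / 2))).map (fun j => s.getD (2 + 2 * j) 0) := by
  simp only [PySem.List.slice?, PySem.List.sliceIndices]
  norm_num
  have he : (if N + 1 < 0 then max (N + 1 + (s.length : Int)) 0 else min (N + 1) (s.length : Int))
      = min (N + 1) (s.length : Int) := if_neg (by omega)
  have hm2 : min (2 : Int) (s.length : Int) = 2 := by omega
  rw [he, hm2]
  have hcnt : (if (2 : Int) < min (N + 1) (s.length : Int) ∨ (s.length : Int) < min (N + 1) (s.length : Int)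
        then ((min (N + 1) (s.length : Int) - 2 + 2 - 1) / 2).toNat else 0)
      = min (N / 2).toNat ((s.length - 1) / 2) := by split_ifs <;> omega
  rw [hcnt]
  apply pv_filterMap_range
  intro k hk
  have hb : 2 + 2 * k < s.length := by omega
  have ht : ((2 : Int) + 2 * (k : Int)).toNat = 2 + 2 * k := by omega
  rw [ht, List.getElem?_eq_getElem hb]
  simp

theorem pv_slice_down (s : List Int) (N : Int) (h2 : 2 ≤ N) (hn : N ≤ (s.length : Int)) (hn2 : 2 ≤ s.length) :
    (PySem.List.slice? s (some 1) (some N) 2).getD []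
    = (List.range (N / 2).toNat).map (fun j => s.getD (1 + 2 * j) 0) := by
  simp only [PySem.List.slice?, PySem.List.sliceIndices]
  norm_num
  have he : (if N < 0 then max (N + (s.length : Int)) 0 else min N (s.length : Int))
      = N := by rw [if_neg (by omega)]; omega
  have hm1 : min (1 : Int) (s.length : Int) = 1 := by omega
  rw [he, hm1]
  have hcnt : (if (1 : Int) < N ∨ (s.length : Int) < N then ((N - 1 + 2 - 1) / 2).toNat else 0)
      = (N / 2).toNat := by split_ifs <;> omega
  rw [hcnt]
  apply pv_filterMap_range
  intro k hk
  have hb : 1 + 2 * k < s.length := by omega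
  have ht : ((1 : Int) + 2 * (k : Int)).toNat = 1 + 2 * k := by omega
  rw [ht, List.getElem?_eq_getElem hb]
  simp

-- ===== VERDICT (by name: the statement is the Claim_ definition above) =====
theorem check_spec : Claim_equal_check := by
  unfold Claim_equal_check
  intro N li _dom hpre
  obtain ⟨hne, hN⟩ := hpre
  simp only [Spec_check, check, check_alt]
  set s := PySem.List.sorted li (fun x => x) true with hs
  have hlen : s.length = li.length := PySem.List.length_sorted li _ true
  have hsne : s ≠ [] := by
    intro h
    exact hne ((PySem.List.sorted_eq_nil_iff li _ true).mp (hs ▸ h))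
  have h1 : 1 ≤ s.length := List.length_pos_iff.mpr hsne
  by_cases hN2 : N < 2
  · rw [if_pos hN2]
    have hr : PySem.List.pyRange 1 N 1 = [] := by
      rw [PySem.List.pyRange_of_pos 1 N one_pos, if_neg (by omega)]
      simp
    rw [hr]
    simp
  · rw [if_neg hN2]
    rw [Int.not_lt] at hN2
    have hn2 : 2 ≤ s.length := by omega
    -- A's construction loop
    rw [PySem.List.pyRange_of_pos 1 N (by norm_num : (0:Int) < 2)]
    have hcnt2 : (if (1 : Int) < N then ((N - 1 + 2 - 1) / 2).toNat else 0) = (N / 2).toNat := by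
      split_ifs <;> omega
    rw [hcnt2]
    rw [pv_build s (N / 2).toNat [PySem.List.pyGetD s 0 0] (by intro j hj; omega)]
    rw [pv_filter_range s.length (N / 2).toNat]
    -- B's slices
    rw [pv_slice_up s N hN2 (by omega) hn2, pv_slice_down s N hN2 (by omega) hn2]
    have htake1 : PySem.List.slice s none (some 1) = [s.getD 0 0] := by
      rw [PySem.List.slice_to s (by norm_num : (0:Int) ≤ 1)]
      obtain ⟨a, t, hct⟩ := List.exists_cons_of_ne_nil hsne
      rw [hct]
      simp
    rw [htake1, PySem.List.pyGetD_zero]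
    set R : List Int := (List.map (fun j => s.getD (2 + 2 * j) 0)
        (List.range (min (N / 2).toNat ((s.length - 1) / 2)))).reverse
      ++ [s.getD 0 0] ++ List.map (fun j => s.getD (1 + 2 * j) 0) (List.range (N / 2).toNat)
      with hR
    have hRlen : (N : Int) ≤ (R.length : Int) := by
      have : R.length = min (N / 2).toNat ((s.length - 1) / 2) + 1 + (N / 2).toNat := by
        simp [hR]
        omega
      omega
    rw [PySem.List.slice_to R (by omega : (0:Int) ≤ N)]
    exact pv_answer R N hN2 hRlen
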